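-- pv_equiv track=rewrite | github.com/7divs7/Project_Scytale | main.py | convert_red_decimalNeighbourhood_to_grid
-- ===== SOURCE A (Python) =====
-- def right_shift(seq, n=1):
--     a = n % len(seq)
--     return seq[-a:] + seq[:-a]
--
-- def convert_blue_decimalNeighbourhood_to_grid(blue_grid):
--     grid = []
--     for row in blue_grid:
--         odd_row = []
--         even_row = []
--         for i in row:
--             b = [int(j) for j in list('{0:0b}'.format(i))]
--             while(len(b)<4):
--                 b.insert(0,0)
--             odd_row.append(b[0])
--             odd_row.append(b[1])
--             even_row.append(b[2])
--             even_row.append(b[3])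
--         grid.append(odd_row)
--         grid.append(even_row)
--     return grid
--
-- def convert_red_decimalNeighbourhood_to_grid(red_grid):
--     '''
--     pop first row
--     insert first row at the end append
--     left shift by 1
--     '''
--     temp = convert_blue_decimalNeighbourhood_to_grid(red_grid)
--     t = temp[0]
--     temp.pop(0)
--     temp.append(t)
--     grid = []
--     for row in temp:
--         grid.append(right_shift(row,7))
--     return grid
-- ===== SOURCE B (Python) =====
-- def convert_red_decimalNeighbourhood_to_grid(red_grid):
--     n2 = 2 * len(red_grid)
--     out = []
--     for r in range(n2):
--         k = (r + 1) % n2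
--         row = red_grid[k // 2]
--         src = []
--         for i in row:
--             s = format(i, '04b')
--             if k % 2 == 0:
--                 src.append(int(s[0])); src.append(int(s[1]))
--             else:
--                 src.append(int(s[2])); src.append(int(s[3]))
--         L = len(src)
--         out.append([src[(j - 7) % L] for j in range(L)])
--     return out
-- ===== Notes on version B (the rewrite author's own statement) =====
-- stated objective: alternative
-- what changed: B inlines right_shift/convert_blue/convert_red into one pass that builds the output grid directly by index arithmetic — output row r is the odd/even bit row of input row ((r+1)%2n)//2 and column j is taken from source column (j-7)%L — instead of A's build-temp-grid, pop/append row rotation and slice-concatenation shift.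
import Mathlib
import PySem

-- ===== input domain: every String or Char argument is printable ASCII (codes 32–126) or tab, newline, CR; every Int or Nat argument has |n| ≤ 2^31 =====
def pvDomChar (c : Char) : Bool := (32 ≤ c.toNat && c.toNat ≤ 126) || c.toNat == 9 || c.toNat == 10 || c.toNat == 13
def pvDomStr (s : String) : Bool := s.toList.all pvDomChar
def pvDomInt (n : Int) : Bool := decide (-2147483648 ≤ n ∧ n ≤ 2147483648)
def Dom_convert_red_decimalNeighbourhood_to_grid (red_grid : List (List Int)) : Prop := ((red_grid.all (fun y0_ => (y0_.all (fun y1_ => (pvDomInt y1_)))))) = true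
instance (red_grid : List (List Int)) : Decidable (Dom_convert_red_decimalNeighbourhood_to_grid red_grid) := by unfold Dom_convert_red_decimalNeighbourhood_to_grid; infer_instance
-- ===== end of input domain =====

-- B inlines the helpers and builds the output by index arithmetic (source row (r+1) % 2n, source column (j-7) % L)
-- instead of pop/append row rotation and slice concatenation; objective: alternative decomposition, same cost.

-- ===== PORT A =====
-- '{0:0b}'.format(i) then int per char: binary digits of |i| MSB-first (Python raises ValueError
-- for negative i, which Pre_ excludes; fuel = n bounds the halving loop, always sufficient).
def pvBinNatF : Nat → Nat → List Int
  | 0, n => [((n % 2 : Nat) : Int)]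
  | fuel+1, n => if n < 2 then [(n : Int)] else pvBinNatF fuel (n / 2) ++ [((n % 2 : Nat) : Int)]

def pvBinNat (n : Nat) : List Int := pvBinNatF n n

-- while len(b) < 4: b.insert(0, 0)   (fuel 4 suffices: each step grows the list by one)
def pvPadLoop : Nat → List Int → List Int
  | 0, b => b
  | fuel+1, b => if b.length < 4 then pvPadLoop fuel ((0 : Int) :: b) else b

def pvPad4 (b : List Int) : List Int := pvPadLoop 4 b

def right_shift (seq : List Int) (n : Int) : List Int :=
  let a := PySem.Int.mod n (seq.length : Int)
  PySem.List.slice seq (some (-a)) none ++ PySem.List.slice seq none (some (-a))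

def convert_blue_decimalNeighbourhood_to_grid (blue_grid : List (List Int)) : List (List Int) :=
  blue_grid.foldl (fun grid row =>
    let oe := row.foldl (fun (oe : List Int × List Int) i =>
      let b := pvPad4 (pvBinNat i.toNat)
      (oe.1 ++ [PySem.List.pyGetD b 0 0, PySem.List.pyGetD b 1 0],
       oe.2 ++ [PySem.List.pyGetD b 2 0, PySem.List.pyGetD b 3 0])) ([], [])
    grid ++ [oe.1, oe.2]) []

def convert_red_decimalNeighbourhood_to_grid (red_grid : List (List Int)) : List (List Int) :=
  let temp := convert_blue_decimalNeighbourhood_to_grid red_grid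
  match temp with
  | [] => []   -- Python: temp[0] raises IndexError here; excluded by Pre_
  | t :: rest => (rest ++ [t]).foldl (fun grid row => grid ++ [right_shift row 7]) []

-- ===== PORT B =====
-- format(i, '04b') as a digit list: zero-pad the binary digits to width ≥ 4
def pvBits4 (i : Int) : List Int :=
  let d := pvBinNat i.toNat
  List.replicate (4 - d.length) 0 ++ d

def convert_red_decimalNeighbourhood_to_grid_alt (red_grid : List (List Int)) : List (List Int) :=
  let n2 : Int := 2 * (red_grid.length : Int)
  (PySem.List.pyRange 0 n2 1).map (fun r =>
    let k := PySem.Int.mod (r + 1) n2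
    let row := PySem.List.pyGetD red_grid (PySem.Int.floordiv k 2) []
    let src := row.foldl (fun src i =>
      let s := pvBits4 i
      if PySem.Int.mod k 2 == 0 then
        src ++ [PySem.List.pyGetD s 0 0, PySem.List.pyGetD s 1 0]
      else
        src ++ [PySem.List.pyGetD s 2 0, PySem.List.pyGetD s 3 0]) []
    let L : Int := (src.length : Int)
    (PySem.List.pyRange 0 L 1).map (fun j => PySem.List.pyGetD src (PySem.Int.mod (j - 7) L) 0))

-- ===== PRECONDITION & SPEC =====
-- Pre_ excludes exactly the inputs on which A raises: the empty grid (IndexError on temp[0]),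
-- a grid containing an empty row (ZeroDivisionError in right_shift), and negative integers
-- (ValueError on int('-')).
def Pre_convert_red_decimalNeighbourhood_to_grid (red_grid : List (List Int)) : Prop :=
  red_grid ≠ [] ∧ ∀ row ∈ red_grid, row ≠ [] ∧ ∀ i ∈ row, 0 ≤ i
instance (red_grid : List (List Int)) : Decidable (Pre_convert_red_decimalNeighbourhood_to_grid red_grid) := by unfold Pre_convert_red_decimalNeighbourhood_to_grid; infer_instance

def pvWitness_convert_red_decimalNeighbourhood_to_grid : List (List Int) := [[1, 6], [3, 0]]

def Spec_convert_red_decimalNeighbourhood_to_grid (red_grid : List (List Int)) (out : List (List Int)) : Prop := out = convert_red_decimalNeighbourhood_to_grid_alt red_grid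
instance (red_grid : List (List Int)) (out : List (List Int)) : Decidable (Spec_convert_red_decimalNeighbourhood_to_grid red_grid out) := by unfold Spec_convert_red_decimalNeighbourhood_to_grid; infer_instance

-- ===== CLAIM (what is proved, stated in full; the proofs are below) =====
def Claim_equal_convert_red_decimalNeighbourhood_to_grid : Prop := ∀ (red_grid : List (List Int)), Dom_convert_red_decimalNeighbourhood_to_grid red_grid → Pre_convert_red_decimalNeighbourhood_to_grid red_grid → Spec_convert_red_decimalNeighbourhood_to_grid red_grid (convert_red_decimalNeighbourhood_to_grid red_grid)


-- ===== LEMMAS AND PROOFS =====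

-- pvPad4 IS left zero-padding to width 4, which is what pvBits4 builds
lemma pvPad4_eq (b : List Int) : pvPad4 b = List.replicate (4 - b.length) 0 ++ b := by
  match b with
  | [] => rfl
  | [_] => rfl
  | [_, _] => rfl
  | [_, _, _] => rfl
  | _ :: _ :: _ :: _ :: _ => simp [pvPad4, pvPadLoop]

def oddOf (row : List Int) : List Int :=
  row.flatMap (fun i => [PySem.List.pyGetD (pvBits4 i) 0 0, PySem.List.pyGetD (pvBits4 i) 1 0])

def evenOf (row : List Int) : List Int :=
  row.flatMap (fun i => [PySem.List.pyGetD (pvBits4 i) 2 0, PySem.List.pyGetD (pvBits4 i) 3 0])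

def tempOf (rg : List (List Int)) : List (List Int) :=
  rg.flatMap (fun row => [oddOf row, evenOf row])

lemma oddOf_ne_nil (row : List Int) (h : row ≠ []) : oddOf row ≠ [] := by
  cases row with
  | nil => exact absurd rfl h
  | cons x xs => simp [oddOf]

lemma evenOf_ne_nil (row : List Int) (h : row ≠ []) : evenOf row ≠ [] := by
  cases row with
  | nil => exact absurd rfl h
  | cons x xs => simp [evenOf]

lemma blue_inner (row : List Int) (o e : List Int) :
    row.foldl (fun (oe : List Int × List Int) i =>
      let b := pvPad4 (pvBinNat i.toNat)
      (oe.1 ++ [PySem.List.pyGetD b 0 0, PySem.List.pyGetD b 1 0],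
       oe.2 ++ [PySem.List.pyGetD b 2 0, PySem.List.pyGetD b 3 0])) (o, e)
    = (o ++ oddOf row, e ++ evenOf row) := by
  induction row generalizing o e with
  | nil => simp [oddOf, evenOf]
  | cons x xs ih =>
    rw [List.foldl_cons]
    refine (ih _ _).trans ?_
    simp [oddOf, evenOf, pvPad4_eq, pvBits4]

lemma blue_eq (rg : List (List Int)) :
    convert_blue_decimalNeighbourhood_to_grid rg = tempOf rg := by
  unfold convert_blue_decimalNeighbourhood_to_grid tempOf
  rw [PySem.List.foldl_append_eq_flatMap]
  simp [blue_inner]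

lemma tempOf_length (rg : List (List Int)) : (tempOf rg).length = 2 * rg.length := by
  induction rg with
  | nil => rfl
  | cons r rs ih => simp [tempOf] at ih ⊢; omega

lemma tempOf_getD (rg : List (List Int)) (k : Nat) (hk : k < 2 * rg.length) :
    (tempOf rg).getD k [] =
      (if k % 2 = 0 then oddOf (rg.getD (k / 2) []) else evenOf (rg.getD (k / 2) [])) := by
  induction rg generalizing k with
  | nil => simp at hk
  | cons r rs ih =>
    match k with
    | 0 => simp [tempOf]
    | 1 => simp [tempOf]
    | k + 2 =>
      have h2 : k < 2 * rs.length := by simp at hk; omega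
      have hrec := ih k h2
      have hm : (k + 2) % 2 = k % 2 := by omega
      have h4 : (k + 2) / 2 = k / 2 + 1 := by omega
      simp only [tempOf] at hrec ⊢
      simp only [List.flatMap_cons, hm, h4]
      simpa using hrec

lemma alt_inner (c : Bool) (row : List Int) :
    row.foldl (fun src i =>
      let s := pvBits4 i
      if c then
        src ++ [PySem.List.pyGetD s 0 0, PySem.List.pyGetD s 1 0]
      else
        src ++ [PySem.List.pyGetD s 2 0, PySem.List.pyGetD s 3 0]) []
    = (if c then oddOf row else evenOf row) := by
  cases c <;> simp [oddOf, evenOf, List.flatMap_def]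

-- right_shift by 7 is drop/take at s = (L - 7 % L) % L
lemma right_shift_eq (src : List Int) (h : src ≠ []) :
    right_shift src 7 =
      src.drop ((src.length - 7 % src.length) % src.length)
        ++ src.take ((src.length - 7 % src.length) % src.length) := by
  have hL : 0 < src.length := List.length_pos_iff.mpr h
  have h7 : (7 : Int) = ((7 : Nat) : Int) := rfl
  show PySem.List.slice src (some (-(PySem.Int.mod 7 (src.length : Int)))) none ++
      PySem.List.slice src none (some (-(PySem.Int.mod 7 (src.length : Int)))) = _
  rw [h7, PySem.Int.mod_natCast]
  by_cases ha : 7 % src.length = 0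
  · rw [ha]
    have e1 : (-(((0 : Nat) : Int))) = (((0 : Nat)) : Int) := by norm_num
    rw [e1, PySem.List.slice_from_natCast, PySem.List.slice_to_natCast]
    simp [Nat.mod_self]
  · have hlt : 7 % src.length < src.length := Nat.mod_lt _ hL
    rw [PySem.List.slice_from_neg_natCast _ _ (Nat.pos_of_ne_zero ha),
        PySem.List.slice_to_neg_natCast _ _ (Nat.pos_of_ne_zero ha)]
    rw [Nat.mod_eq_of_lt (show src.length - 7 % src.length < src.length by omega)]

lemma rotget_mod (src : List Int) (s t : Nat) (hs : s < src.length) (ht : t < src.length) :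
    (src.drop s ++ src.take s).getD t 0 = src.getD ((t + s) % src.length) 0 := by
  by_cases h : t < src.length - s
  · rw [List.getD_append _ _ _ _ (by simp; omega)]
    rw [List.getD_eq_getElem?_getD, List.getD_eq_getElem?_getD]
    rw [List.getElem?_drop]
    rw [Nat.mod_eq_of_lt (show t + s < src.length by omega)]
    rw [Nat.add_comm s t]
  · rw [List.getD_append_right _ _ _ _ (by simp; omega)]
    rw [List.getD_eq_getElem?_getD, List.getD_eq_getElem?_getD]
    have hlen : (src.drop s).length = src.length - s := by simp
    rw [hlen, List.getElem?_take]
    have h2 : (t + s) % src.length = t - (src.length - s) := by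
      have he : t + s = (t - (src.length - s)) + src.length := by omega
      rw [he, Nat.add_mod_right, Nat.mod_eq_of_lt (by omega)]
    rw [h2]
    simp [show t - (src.length - s) < s by omega]

-- the Int-mod index B computes equals the Nat-mod index of the rotation
lemma mod_index_eq (L s t : Nat) (hL : 0 < L) (hs : s = (L - 7 % L) % L) :
    PySem.Int.mod ((t : Int) - 7) (L : Int) = (((t + s) % L : Nat) : Int) := by
  have hdvd : L ∣ s + 7 := by
    by_cases ha : 7 % L = 0
    · have hz : s = 0 := by simp [hs, ha, Nat.mod_self]
      rw [hz]
      simpa [Nat.dvd_iff_mod_eq_zero] using ha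
    · have hlt : 7 % L < L := Nat.mod_lt _ hL
      have hse : s = L - 7 % L := by rw [hs, Nat.mod_eq_of_lt (by omega)]
      have h7 : 7 = L * (7 / L) + 7 % L := (Nat.div_add_mod 7 L).symm
      refine ⟨7 / L + 1, ?_⟩
      have hmul : L * (7 / L + 1) = L * (7 / L) + L := by ring
      omega
  obtain ⟨c, hc⟩ := hdvd
  rw [PySem.Int.mod_eq_emod_of_pos (by exact_mod_cast hL)]
  have hc' : ((s : Int) + 7) = (L : Int) * (c : Int) := by exact_mod_cast hc
  have key : ((t : Int) - 7) = ((t + s : Nat) : Int) + (L : Int) * (-(c : Int)) := by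
    push_cast
    linarith
  rw [key, Int.add_mul_emod_self_left]
  push_cast
  ring_nf

-- B's per-row comprehension IS right_shift by 7
lemma alt_row_eq (src : List Int) (h : src ≠ []) :
    (PySem.List.pyRange 0 (src.length : Int) 1).map
        (fun j => PySem.List.pyGetD src (PySem.Int.mod (j - 7) (src.length : Int)) 0)
      = right_shift src 7 := by
  have hL : 0 < src.length := List.length_pos_iff.mpr h
  set s := (src.length - 7 % src.length) % src.length with hs
  have hsL : s < src.length := Nat.mod_lt _ hL
  rw [right_shift_eq src h, ← hs]
  rw [PySem.List.pyRange_one]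
  simp only [Int.sub_zero, Int.toNat_natCast, List.map_map]
  apply List.ext_getElem
  · simp
    omega
  · intro t h1 h2
    simp only [List.getElem_map, List.getElem_range, Function.comp_apply]
    have ht : t < src.length := by simpa using h1
    rw [show ((0 : Int) + (t : Int)) = (t : Int) by ring]
    rw [mod_index_eq src.length s t hL hs]
    rw [PySem.List.pyGetD_natCast]
    rw [← rotget_mod src s t hsL ht]
    rw [List.getD_eq_getElem _ _ h2]

-- rotation of the outer list, element-wise
lemma rot_outer (x : List Int) (xs : List (List Int)) (t : Nat) (ht : t < xs.length + 1) :
    (xs ++ [x]).getD t [] = (x :: xs).getD ((t + 1) % (xs.length + 1)) [] := by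
  by_cases h : t < xs.length
  · rw [List.getD_append _ _ _ _ h, Nat.mod_eq_of_lt (by omega)]
    simp
  · have heq : t = xs.length := by omega
    subst heq
    rw [List.getD_append_right _ _ _ _ (le_refl _)]
    simp [Nat.mod_self]

-- A on a nonempty grid, as an index map over the rotated tempOf
lemma A_eq (r0 : List Int) (rs : List (List Int)) :
    convert_red_decimalNeighbourhood_to_grid (r0 :: rs)
      = (List.range (2 * (r0 :: rs).length)).map
          (fun t => right_shift ((tempOf (r0 :: rs)).getD ((t + 1) % (2 * (r0 :: rs).length)) []) 7) := by
  have htemp : tempOf (r0 :: rs) = oddOf r0 :: evenOf r0 :: tempOf rs := by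
    simp [tempOf]
  simp only [convert_red_decimalNeighbourhood_to_grid, blue_eq, htemp]
  rw [PySem.List.foldl_append_singleton_eq_map]
  apply List.ext_getElem
  · simp [tempOf_length]
    omega
  · intro t h1 h2
    have hlen : (evenOf r0 :: tempOf rs).length = 2 * rs.length + 1 := by
      simp [tempOf_length]
    have ht : t < 2 * rs.length + 2 := by
      simp [tempOf_length] at h1
      omega
    simp only [List.getElem_map, List.getElem_range, List.nil_append]
    congr 1
    have hro := rot_outer (oddOf r0) (evenOf r0 :: tempOf rs) t (by omega)
    rw [hlen] at hro
    rw [← htemp] at hro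
    have hgoal1 : ((evenOf r0 :: tempOf rs) ++ [oddOf r0]).getD t [] =
        ((evenOf r0 :: tempOf rs) ++ [oddOf r0])[t]'(by simpa using h1) := by
      rw [List.getD_eq_getElem]
    rw [← hgoal1, hro]
    have hlc : (r0 :: rs).length = rs.length + 1 := rfl
    rw [hlc]
    have h2e : 2 * (rs.length + 1) = 2 * rs.length + 1 + 1 := by omega
    rw [h2e, htemp]

-- B on any grid with nonempty rows, as the same index map
lemma alt_eq (rg : List (List Int)) (hrows : ∀ row ∈ rg, row ≠ [] ∧ ∀ i ∈ row, 0 ≤ i) :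
    convert_red_decimalNeighbourhood_to_grid_alt rg
      = (List.range (2 * rg.length)).map
          (fun t => right_shift ((tempOf rg).getD ((t + 1) % (2 * rg.length)) []) 7) := by
  simp only [convert_red_decimalNeighbourhood_to_grid_alt]
  rw [PySem.List.pyRange_one]
  have h2n : ((2 * (rg.length : Int)) - 0).toNat = 2 * rg.length := by omega
  rw [h2n, List.map_map]
  refine List.map_congr_left ?_
  intro t htmem
  have ht : t < 2 * rg.length := List.mem_range.mp htmem
  have hlen : 0 < rg.length := by omega
  simp only [Function.comp_apply]
  have hcast : (2 * (rg.length : Int)) = ((2 * rg.length : Nat) : Int) := by push_cast; ring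
  have hk : PySem.Int.mod ((0 : Int) + (t : Int) + 1) (2 * (rg.length : Int))
      = (((t + 1) % (2 * rg.length) : Nat) : Int) := by
    rw [hcast, show ((0 : Int) + (t : Int) + 1) = (((t + 1 : Nat)) : Int) by push_cast; ring]
    exact PySem.Int.mod_natCast (t + 1) (2 * rg.length)
  set k' := (t + 1) % (2 * rg.length) with hk'
  have hk'lt : k' < 2 * rg.length := Nat.mod_lt _ (by omega)
  have hdiv : PySem.Int.floordiv ((k' : Nat) : Int) 2 = ((k' / 2 : Nat) : Int) := by
    exact_mod_cast PySem.Int.floordiv_natCast k' 2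
  have hmod2 : PySem.Int.mod ((k' : Nat) : Int) 2 = ((k' % 2 : Nat) : Int) := by
    exact_mod_cast PySem.Int.mod_natCast k' 2
  have hrowlt : k' / 2 < rg.length := by omega
  have hrowget : PySem.List.pyGetD rg ((k' / 2 : Nat) : Int) [] = rg.getD (k' / 2) [] :=
    PySem.List.pyGetD_natCast rg (k' / 2) []
  have hrowne : rg.getD (k' / 2) [] ≠ [] := by
    have hmem : rg.getD (k' / 2) [] ∈ rg := by
      rw [List.getD_eq_getElem _ _ hrowlt]
      exact List.getElem_mem _
    exact (hrows _ hmem).1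
  rw [hk, hdiv, hmod2, hrowget]
  rw [alt_inner ((((k' % 2 : Nat) : Int)) == 0) (rg.getD (k' / 2) [])]
  rw [tempOf_getD rg k' hk'lt]
  by_cases hpar : k' % 2 = 0
  · simp only [hpar, Nat.cast_zero, beq_self_eq_true, if_true]
    exact alt_row_eq _ (oddOf_ne_nil _ hrowne)
  · have hb : ((((k' % 2 : Nat) : Int)) == 0) = false := by
      rw [beq_eq_false_iff_ne]
      exact fun h => hpar (by exact_mod_cast h)
    simp only [hb, if_neg hpar]
    exact alt_row_eq _ (evenOf_ne_nil _ hrowne)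

-- ===== VERDICT (by name: the statement is the Claim_ definition above) =====
theorem convert_red_decimalNeighbourhood_to_grid_spec : Claim_equal_convert_red_decimalNeighbourhood_to_grid := by
  intro rg hdom hpre
  obtain ⟨hne, hrows⟩ := hpre
  unfold Spec_convert_red_decimalNeighbourhood_to_grid
  cases rg with
  | nil => exact absurd rfl hne
  | cons r0 rs =>
    rw [A_eq r0 rs, alt_eq (r0 :: rs) hrows]
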